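-- pv_equiv track=rewrite | github.com/Lv296TAQC/python_tasks | tasks/task_331b.py | func
-- ===== SOURCE A (Python) =====
-- def func(numb: int) -> list:
--     """
--     Find all triples of natural numbers,
--     whose sum of squares is equal to the numb.
--
--     :param numb: any number.
--     :return: contains tuples of the three natural numbers.
--
--     :Example:
--         >>> func(100)
--         [(8, 6, 0), (10, 0, 0)]
--     """
--     answer = []
--     for i in range(numb):
--         for j in range(numb):
--             for k in range(numb):
--                 if i * i + j * j + k * k == numb and k <= j <= i:
--                     answer.append((i, j, k))
--     return answer
-- ===== SOURCE B (Python) =====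
-- def _isqrt(n):
--     """Largest integer s with s*s <= n (n >= 0), by binary search."""
--     lo, hi = 0, n
--     while lo < hi:
--         mid = (lo + hi + 1) // 2
--         if mid * mid <= n:
--             lo = mid
--         else:
--             hi = mid - 1
--     return lo
--
--
-- def func(numb: int) -> list:
--     answer = []
--     i = 0
--     while i * i <= numb:
--         j = 0
--         while j <= i and i * i + j * j <= numb:
--             rem = numb - i * i - j * j
--             k = _isqrt(rem)
--             if k * k == rem and k <= j:
--                 answer.append((i, j, k))
--             j += 1
--         i += 1
--     return answer
-- ===== Notes on version B (the rewrite author's own statement) =====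
-- stated objective: faster
-- what changed: Replaces the triple nested scan over range(numb)^3 by an outer loop i,j bounded by sqrt(numb) that solves for the third component k directly with a binary-search integer-sqrt perfect-square test.
-- intended difference: For numb = 0 and numb = 1 A returns [] because range(numb) stops just below the needed root (i = 0 resp. i = 1 with i*i = numb is excluded), while B returns the documented answer [(0,0,0)] resp. [(1,0,0)]; B's value is intended since the docstring asks for all natural triples whose squares sum to numb and the example itself lists (10,0,0) for 100. — e.g. on func(0): A returns [], B returns [(0, 0, 0)]
import Mathlib
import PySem

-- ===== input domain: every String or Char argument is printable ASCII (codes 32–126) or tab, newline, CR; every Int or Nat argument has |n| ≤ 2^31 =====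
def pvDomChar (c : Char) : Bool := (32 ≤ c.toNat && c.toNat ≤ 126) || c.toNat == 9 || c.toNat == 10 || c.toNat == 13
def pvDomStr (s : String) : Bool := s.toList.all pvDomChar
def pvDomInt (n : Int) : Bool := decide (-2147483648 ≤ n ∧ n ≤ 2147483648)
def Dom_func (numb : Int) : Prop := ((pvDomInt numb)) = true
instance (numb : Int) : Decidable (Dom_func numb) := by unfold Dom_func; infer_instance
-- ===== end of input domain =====

-- B replaces A's triple scan over range(numb)^3 by i,j loops bounded by sqrt(numb) that solve
-- for k directly with a binary-search integer square root (objective: faster, asymptotically).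

-- ===== PORT A =====
def func (numb : Int) : List (Int × Int × Int) :=
  (PySem.List.pyRange 0 numb 1).foldl (fun answer i =>
    (PySem.List.pyRange 0 numb 1).foldl (fun answer j =>
      (PySem.List.pyRange 0 numb 1).foldl (fun answer k =>
        if i * i + j * j + k * k = numb ∧ k ≤ j ∧ j ≤ i then answer ++ [(i, j, k)]
        else answer) answer) answer) []

-- ===== PORT B =====
-- mid = (lo + hi + 1) // 2 of Source B's _isqrt, named so the termination proof can cite its bounds
def bsMid (lo hi : Int) : Int := PySem.Int.floordiv (lo + hi + 1) 2

theorem bsMid_bounds {lo hi : Int} (h : lo < hi) : lo + 1 ≤ bsMid lo hi ∧ bsMid lo hi ≤ hi := by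
  unfold bsMid
  rw [PySem.Int.floordiv_eq_ediv_of_pos (by omega)]
  omega

-- the while-loop of Source B's _isqrt
def isqrtLoop (n lo hi : Int) : Int :=
  if _h : lo < hi then
    if bsMid lo hi * bsMid lo hi ≤ n then isqrtLoop n (bsMid lo hi) hi
    else isqrtLoop n lo (bsMid lo hi - 1)
  else lo
termination_by (hi - lo).toNat
decreasing_by
  · have := bsMid_bounds _h; omega
  · have := bsMid_bounds _h; omega

-- Source B's _isqrt(n)
def pyIsqrt (n : Int) : Int := isqrtLoop n 0 n

-- needed by altOuter's termination: i*i <= numb forces i <= numb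
theorem le_of_sq_le {i numb : Int} (h : i * i ≤ numb) : i ≤ numb := by
  have hn : 0 ≤ numb := le_trans (mul_self_nonneg i) h
  rcases (by omega : i ≤ 0 ∨ 0 < i) with hi | hi
  · omega
  · nlinarith

-- inner while-loop of Source B's func (over j)
def altInner (numb i : Int) (j : Int) (acc : List (Int × Int × Int)) : List (Int × Int × Int) :=
  if h : j ≤ i ∧ i * i + j * j ≤ numb then
    let rem := numb - i * i - j * j
    let k := pyIsqrt rem
    altInner numb i (j + 1) (if k * k = rem ∧ k ≤ j then acc ++ [(i, j, k)] else acc)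
  else acc
termination_by (i + 1 - j).toNat
decreasing_by have := h.1; omega

-- outer while-loop of Source B's func (over i)
def altOuter (numb : Int) (i : Int) (acc : List (Int × Int × Int)) : List (Int × Int × Int) :=
  if h : i * i ≤ numb then altOuter numb (i + 1) (altInner numb i 0 acc) else acc
termination_by (numb + 1 - i).toNat
decreasing_by have := le_of_sq_le h; omega

def func_alt (numb : Int) : List (Int × Int × Int) := altOuter numb 0 []

-- ===== PRECONDITION & SPEC =====
-- For numb = 0 and numb = 1 A returns [] because range(numb) stops just below the needed root,
-- while B returns [(0,0,0)] resp. [(1,0,0)]; B's is the documented intent (all natural triples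
-- whose squares sum to numb — the docstring's own example lists (10,0,0) for 100).
def D_func (numb : Int) : Prop := numb = 0 ∨ numb = 1
instance (numb : Int) : Decidable (D_func numb) := by unfold D_func; infer_instance

def Spec_func (numb : Int) (out : List (Int × Int × Int)) : Prop := ¬ D_func numb → out = func_alt numb
instance (numb : Int) (out : List (Int × Int × Int)) : Decidable (Spec_func numb out) := by unfold Spec_func; infer_instance

def pvDiffWitness_func : Int := 0
def pvDiffWitnessOut_func : (List (Int × Int × Int)) × (List (Int × Int × Int)) := ([], [(0, 0, 0)])

-- ===== CLAIM (what is proved, stated in full; the proofs are below) =====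
def Claim_unchanged_func : Prop := ∀ (numb : Int), Dom_func numb → Spec_func numb (func numb)
def Claim_changed_func : Prop := Dom_func (pvDiffWitness_func) ∧ D_func (pvDiffWitness_func) ∧ func (pvDiffWitness_func) = pvDiffWitnessOut_func.1 ∧ func_alt (pvDiffWitness_func) = pvDiffWitnessOut_func.2 ∧ pvDiffWitnessOut_func.1 ≠ pvDiffWitnessOut_func.2
def Claim_exact_func : Prop := ∀ (numb : Int), Dom_func numb → D_func numb → func numb ≠ func_alt numb

-- ===== LEMMAS AND PROOFS =====

-- A's per-(i,j) innermost-loop yield: the k in [0,numb) passing the test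
def kContrib (numb i j : Int) : List (Int × Int × Int) :=
  ((PySem.List.pyRange 0 numb 1).filter
      (fun k => decide (i * i + j * j + k * k = numb ∧ k ≤ j ∧ j ≤ i))).map (fun k => (i, j, k))

-- B's per-(i,j) yield
def gContrib (numb i j : Int) : List (Int × Int × Int) :=
  if j ≤ i ∧ i * i + j * j ≤ numb then
    (if pyIsqrt (numb - i * i - j * j) * pyIsqrt (numb - i * i - j * j) = numb - i * i - j * j
        ∧ pyIsqrt (numb - i * i - j * j) ≤ j
     then [(i, j, pyIsqrt (numb - i * i - j * j))] else [])
  else []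

theorem foldl_if_append {α β : Type} (p : α → Prop) [DecidablePred p] (f : α → β) :
    ∀ (l : List α) (acc : List β),
      l.foldl (fun a x => if p x then a ++ [f x] else a) acc
        = acc ++ (l.filter fun x => decide (p x)).map f := by
  intro l
  induction l with
  | nil => intro acc; simp
  | cons x t ih =>
    intro acc
    simp only [List.foldl_cons, List.filter_cons]
    by_cases hx : p x
    · simp [hx, ih, List.append_assoc]
    · simp [hx, ih]

theorem flatMap_congr_mem {α β : Type} (l : List α) (f g : α → List β)
    (h : ∀ x ∈ l, f x = g x) : l.flatMap f = l.flatMap g := by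
  induction l with
  | nil => rfl
  | cons x t ih =>
    simp only [List.flatMap_cons]
    rw [h x (List.mem_cons_self), ih (fun y hy => h y (List.mem_cons_of_mem _ hy))]

theorem func_char (numb : Int) :
    func numb = (PySem.List.pyRange 0 numb 1).flatMap (fun i =>
      (PySem.List.pyRange 0 numb 1).flatMap (fun j => kContrib numb i j)) := by
  unfold func
  have hin : ∀ (i j : Int) (acc : List (Int × Int × Int)),
      (PySem.List.pyRange 0 numb 1).foldl (fun answer k =>
        if i * i + j * j + k * k = numb ∧ k ≤ j ∧ j ≤ i then answer ++ [(i, j, k)]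
        else answer) acc = acc ++ kContrib numb i j := by
    intro i j acc
    exact foldl_if_append (fun k => i * i + j * j + k * k = numb ∧ k ≤ j ∧ j ≤ i)
      (fun k => (i, j, k)) _ acc
  have hmid : ∀ (i : Int) (acc : List (Int × Int × Int)),
      (PySem.List.pyRange 0 numb 1).foldl (fun answer j =>
        (PySem.List.pyRange 0 numb 1).foldl (fun answer k =>
          if i * i + j * j + k * k = numb ∧ k ≤ j ∧ j ≤ i then answer ++ [(i, j, k)]
          else answer) answer) acc
      = acc ++ (PySem.List.pyRange 0 numb 1).flatMap (fun j => kContrib numb i j) := by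
    intro i acc
    rw [PySem.List.foldl_congr_mem _ _ (fun answer j => answer ++ kContrib numb i j) acc
      (fun a j _ => hin i j a), PySem.List.foldl_append_eq_flatMap]
  rw [PySem.List.foldl_congr_mem _ _
      (fun answer i => answer ++ (PySem.List.pyRange 0 numb 1).flatMap (fun j => kContrib numb i j)) []
      (fun a i _ => hmid i a), PySem.List.foldl_append_eq_flatMap]
  simp

theorem isqrtLoop_spec : ∀ (m : Nat) (n lo hi : Int), (hi - lo).toNat = m →
    0 ≤ lo → lo ≤ hi → lo * lo ≤ n → n < (hi + 1) * (hi + 1) →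
    lo ≤ isqrtLoop n lo hi ∧ isqrtLoop n lo hi * isqrtLoop n lo hi ≤ n ∧
      n < (isqrtLoop n lo hi + 1) * (isqrtLoop n lo hi + 1) := by
  intro m
  induction m using Nat.strong_induction_on with
  | _ m ih =>
    intro n lo hi hm h0 hlh hlo hhi
    rw [isqrtLoop]
    split_ifs with h1 h2
    · have hb := bsMid_bounds h1
      have hr := ih (hi - bsMid lo hi).toNat (by omega) n (bsMid lo hi) hi rfl
        (by omega) (by omega) h2 hhi
      exact ⟨by omega, hr.2.1, hr.2.2⟩
    · have hb := bsMid_bounds h1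
      have hr := ih (bsMid lo hi - 1 - lo).toNat (by omega) n lo (bsMid lo hi - 1) rfl
        h0 (by omega) hlo (by simpa using not_le.mp h2)
      exact hr
    · have : lo = hi := by omega
      exact ⟨le_rfl, hlo, by rw [this]; exact hhi⟩

theorem pyIsqrt_spec {n : Int} (hn : 0 ≤ n) :
    0 ≤ pyIsqrt n ∧ pyIsqrt n * pyIsqrt n ≤ n ∧ n < (pyIsqrt n + 1) * (pyIsqrt n + 1) := by
  exact isqrtLoop_spec (n - 0).toNat n 0 n rfl le_rfl hn (by simpa using hn) (by nlinarith)

theorem sq_eq_of_sq_eq {a b : Int} (ha : 0 ≤ a) (hb : 0 ≤ b) (h : a * a = b * b) : a = b := by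
  nlinarith [sq_nonneg (a - b), sq_nonneg (a + b)]

theorem kContrib_eq_g (numb i j : Int) (hjn : j < numb) :
    kContrib numb i j = gContrib numb i j := by
  unfold kContrib gContrib
  by_cases h1 : j ≤ i ∧ i * i + j * j ≤ numb
  · obtain ⟨hji, hijn⟩ := h1
    have hrem : (0:Int) ≤ numb - i * i - j * j := by linarith
    obtain ⟨hk0, hsq, hub⟩ := pyIsqrt_spec hrem
    set k0 := pyIsqrt (numb - i * i - j * j) with hk0def
    rw [if_pos ⟨hji, hijn⟩]
    by_cases h2 : k0 * k0 = numb - i * i - j * j ∧ k0 ≤ j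
    · rw [if_pos h2]
      obtain ⟨hsqeq, hk0j⟩ := h2
      have huniq : ∀ k : Int, 0 ≤ k → i * i + j * j + k * k = numb → k = k0 := by
        intro k hk hkeq
        exact sq_eq_of_sq_eq hk hk0 (by linarith)
      rw [PySem.List.pyRange_one_append 0 k0 numb hk0 (by omega),
          PySem.List.pyRange_one_cons (by omega : k0 < numb)]
      rw [List.filter_append, List.filter_cons]
      have hfront : (PySem.List.pyRange 0 k0 1).filter
          (fun k => decide (i * i + j * j + k * k = numb ∧ k ≤ j ∧ j ≤ i)) = [] := by
        rw [List.filter_eq_nil_iff]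
        intro k hk hp
        rw [PySem.List.mem_pyRange_one] at hk
        rw [decide_eq_true_eq] at hp
        exact absurd (huniq k hk.1 hp.1) (by omega)
      have hback : (PySem.List.pyRange (k0 + 1) numb 1).filter
          (fun k => decide (i * i + j * j + k * k = numb ∧ k ≤ j ∧ j ≤ i)) = [] := by
        rw [List.filter_eq_nil_iff]
        intro k hk hp
        rw [PySem.List.mem_pyRange_one] at hk
        rw [decide_eq_true_eq] at hp
        exact absurd (huniq k (by omega) hp.1) (by omega)
      have hcond : decide (i * i + j * j + k0 * k0 = numb ∧ k0 ≤ j ∧ j ≤ i) = true := by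
        rw [decide_eq_true_eq]
        exact ⟨by linarith, hk0j, hji⟩
      rw [hfront, hback, hcond]
      simp
    · rw [if_neg h2]
      have hnil : (PySem.List.pyRange 0 numb 1).filter
          (fun k => decide (i * i + j * j + k * k = numb ∧ k ≤ j ∧ j ≤ i)) = [] := by
        rw [List.filter_eq_nil_iff]
        intro k hk hp
        rw [PySem.List.mem_pyRange_one] at hk
        rw [decide_eq_true_eq] at hp
        obtain ⟨hkeq, hkj, _⟩ := hp
        have hkk : k * k = numb - i * i - j * j := by linarith
        have hle : k0 ≤ k := by nlinarith [hk.1]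
        have hlt : k < k0 + 1 := by nlinarith [hk.1]
        have hkk0 : k = k0 := by omega
        exact h2 ⟨by rw [← hkk0]; exact hkk, by omega⟩
      rw [hnil]
      rfl
  · rw [if_neg h1]
    have hnil : (PySem.List.pyRange 0 numb 1).filter
        (fun k => decide (i * i + j * j + k * k = numb ∧ k ≤ j ∧ j ≤ i)) = [] := by
      rw [List.filter_eq_nil_iff]
      intro k hk hp
      rw [decide_eq_true_eq] at hp
      obtain ⟨hkeq, _, hji⟩ := hp
      exact h1 ⟨hji, by nlinarith [mul_self_nonneg k]⟩
    rw [hnil]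
    rfl

theorem altInner_char (numb i : Int) : ∀ (m : Nat) (j : Int) (acc : List (Int × Int × Int)),
    (i + 1 - j).toNat = m → 0 ≤ j →
    altInner numb i j acc = acc ++ (PySem.List.pyRange j (i + 1) 1).flatMap (gContrib numb i) := by
  intro m
  induction m using Nat.strong_induction_on with
  | _ m ih =>
    intro j acc hm hj
    rw [altInner]
    split_ifs with h
    · obtain ⟨hji, hijn⟩ := h
      rw [PySem.List.pyRange_one_cons (by omega : j < i + 1), List.flatMap_cons]
      rw [ih (i + 1 - (j + 1)).toNat (by omega) (j + 1) _ rfl (by omega)]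
      have hg : gContrib numb i j =
          (if pyIsqrt (numb - i * i - j * j) * pyIsqrt (numb - i * i - j * j) = numb - i * i - j * j
              ∧ pyIsqrt (numb - i * i - j * j) ≤ j
           then [(i, j, pyIsqrt (numb - i * i - j * j))] else []) := by
        unfold gContrib
        rw [if_pos ⟨hji, hijn⟩]
      rw [hg]
      split_ifs with hc
      · simp [List.append_assoc]
      · simp
    · by_cases hji : j ≤ i
      · have hgt : ¬ (i * i + j * j ≤ numb) := fun hc => h ⟨hji, hc⟩
        rw [flatMap_congr_mem _ _ (fun _ => ([] : List (Int × Int × Int))) ?hz]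
        · simp
        case hz =>
          intro x hx
          rw [PySem.List.mem_pyRange_one] at hx
          unfold gContrib
          rw [if_neg]
          rintro ⟨hxi, hxn⟩
          have : j * j ≤ x * x := by nlinarith
          exact hgt (by linarith)
      · rw [PySem.List.pyRange_one_eq_nil (by omega)]
        simp

theorem altOuter_char (numb : Int) (hn : 0 ≤ numb) : ∀ (m : Nat) (i : Int) (acc : List (Int × Int × Int)),
    (numb + 1 - i).toNat = m → 0 ≤ i →
    altOuter numb i acc = acc ++ (PySem.List.pyRange i (pyIsqrt numb + 1) 1).flatMap (fun i' =>
      (PySem.List.pyRange 0 (i' + 1) 1).flatMap (gContrib numb i')) := by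
  obtain ⟨hS0, hSsq, hSub⟩ := pyIsqrt_spec hn
  intro m
  induction m using Nat.strong_induction_on with
  | _ m ih =>
    intro i acc hm hi
    rw [altOuter]
    split_ifs with h
    · have hiS : i ≤ pyIsqrt numb := by
        by_contra hc
        push Not at hc
        have : (pyIsqrt numb + 1) * (pyIsqrt numb + 1) ≤ i * i := by nlinarith
        linarith
      have hin : i ≤ numb := le_of_sq_le h
      rw [altInner_char numb i (i + 1 - 0).toNat 0 acc rfl le_rfl]
      rw [ih (numb + 1 - (i + 1)).toNat (by omega) (i + 1) _ rfl (by omega)]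
      rw [PySem.List.pyRange_one_cons (by omega : i < pyIsqrt numb + 1), List.flatMap_cons]
      simp [List.append_assoc]
    · have hiS : pyIsqrt numb < i := by
        by_contra hc
        push Not at hc
        have : i * i ≤ pyIsqrt numb * pyIsqrt numb := by nlinarith
        exact h (le_trans this hSsq)
      rw [PySem.List.pyRange_one_eq_nil (by omega)]
      simp

theorem main_eq (numb : Int) (hn : 2 ≤ numb) : func numb = func_alt numb := by
  have hn0 : (0:Int) ≤ numb := by omega
  obtain ⟨hS0, hSsq, hSub⟩ := pyIsqrt_spec hn0
  have hSlt : pyIsqrt numb < numb := by nlinarith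
  rw [func_char]
  unfold func_alt
  rw [altOuter_char numb hn0 (numb + 1 - 0).toNat 0 [] rfl le_rfl]
  simp only [List.nil_append]
  rw [flatMap_congr_mem _ _
      (fun i => (PySem.List.pyRange 0 (i + 1) 1).flatMap (gContrib numb i)) ?hstep]
  case hstep =>
    intro i hi
    rw [PySem.List.mem_pyRange_one] at hi
    rw [flatMap_congr_mem _ _ (gContrib numb i) (fun j hj => by
      rw [PySem.List.mem_pyRange_one] at hj
      exact kContrib_eq_g numb i j hj.2)]
    rw [PySem.List.pyRange_one_append 0 (i + 1) numb (by omega) (by omega), List.flatMap_append]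
    have htail : (PySem.List.pyRange (i + 1) numb 1).flatMap (gContrib numb i) = [] := by
      rw [flatMap_congr_mem _ _ (fun _ => ([] : List (Int × Int × Int))) (fun j hj => by
        rw [PySem.List.mem_pyRange_one] at hj
        unfold gContrib
        rw [if_neg]
        rintro ⟨hji, _⟩
        omega)]
      simp
    rw [htail, List.append_nil]
  rw [PySem.List.pyRange_one_append 0 (pyIsqrt numb + 1) numb (by omega) (by omega),
      List.flatMap_append]
  have htail : (PySem.List.pyRange (pyIsqrt numb + 1) numb 1).flatMap (fun i =>
      (PySem.List.pyRange 0 (i + 1) 1).flatMap (gContrib numb i)) = [] := by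
    rw [flatMap_congr_mem _ _ (fun _ => ([] : List (Int × Int × Int))) (fun i hi => by
      rw [PySem.List.mem_pyRange_one] at hi
      rw [flatMap_congr_mem _ _ (fun _ => ([] : List (Int × Int × Int))) (fun j hj => by
        rw [PySem.List.mem_pyRange_one] at hj
        unfold gContrib
        rw [if_neg]
        rintro ⟨hji, hsum⟩
        have h1 : (pyIsqrt numb + 1) * (pyIsqrt numb + 1) ≤ i * i := by nlinarith
        nlinarith [mul_self_nonneg j])]
      simp)]
    simp
  rw [htail, List.append_nil]

theorem func_alt_zero : func_alt 0 = [(0, 0, 0)] := by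
  have hq : pyIsqrt 0 = 0 := by rw [pyIsqrt, isqrtLoop]; norm_num
  simp only [func_alt]
  rw [altOuter]; norm_num
  rw [altInner]; norm_num
  rw [hq]; norm_num
  rw [altInner]; norm_num
  rw [altOuter]; norm_num

theorem func_alt_one : func_alt 1 = [(1, 0, 0)] := by
  have h0 : pyIsqrt 0 = 0 := by rw [pyIsqrt, isqrtLoop]; norm_num
  have h1 : pyIsqrt 1 = 1 := by
    rw [pyIsqrt, isqrtLoop]
    norm_num [bsMid, PySem.Int.floordiv_eq_ediv_of_pos]
    rw [isqrtLoop]; norm_num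
  simp only [func_alt]
  rw [altOuter]; norm_num
  rw [altInner]; norm_num
  rw [h1]; norm_num
  rw [altInner]; norm_num
  rw [altOuter]; norm_num
  rw [altInner]; norm_num
  rw [h0]; norm_num
  rw [altInner]; norm_num
  rw [altOuter]; norm_num

theorem neg_eq (numb : Int) (hn : numb < 0) : func numb = func_alt numb := by
  unfold func func_alt
  rw [PySem.List.pyRange_one_eq_nil (le_of_lt hn)]
  rw [altOuter, dif_neg (by norm_num; omega)]
  rfl

-- ===== VERDICT (by name: the statement is the Claim_ definition above) =====
theorem func_spec : Claim_unchanged_func := by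
  intro numb _ hD
  unfold D_func at hD
  rcases (by omega : numb < 0 ∨ 0 ≤ numb) with h | h
  · exact neg_eq numb h
  · exact main_eq numb (by omega)

theorem func_changed : Claim_changed_func := by
  unfold Claim_changed_func
  refine ⟨by decide, Or.inl rfl, by decide, ?_, by decide⟩
  simpa [pvDiffWitness_func, pvDiffWitnessOut_func] using func_alt_zero

theorem func_tight : Claim_exact_func := by
  intro numb _ hD
  rcases hD with h | h <;> subst h
  · have hA : func 0 = [] := by decide
    rw [hA, func_alt_zero]
    simp
  · have hA : func 1 = [] := by decide
    rw [hA, func_alt_one]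
    simp
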